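-- pv_equiv track=rewrite | github.com/Sustainable-IT-Manifesto/eco-rules-catalog | tools/generate_human_catalog_v2.py | group_by_layer
-- ===== SOURCE A (Python) =====
-- from collections import defaultdict
--
-- def group_by_layer(rules: list[dict]) -> dict[str, list[dict]]:
--     groups = defaultdict(list)
--     for rule in rules:
--         layer = str(rule.get("layer", "")).strip().lower()
--         groups[layer].append(rule)
--     for layer in groups:
--         groups[layer] = sorted(groups[layer], key=lambda r: r.get("id", ""))
--     return groups
-- ===== SOURCE B (Python) =====
-- from collections import defaultdict
--
--
-- def _norm(rule):
--     return str(rule.get("layer", "")).strip().lower()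
--
--
-- def group_by_layer(rules: list[dict]) -> dict[str, list[dict]]:
--     ordered = sorted(rules, key=lambda r: r.get("id", ""))
--     layers = []
--     for r in rules:
--         lay = _norm(r)
--         if lay not in layers:
--             layers.append(lay)
--     return defaultdict(list, {lay: [r for r in ordered if _norm(r) == lay] for lay in layers})
-- ===== Notes on version B (the rewrite author's own statement) =====
-- stated objective: alternative
-- what changed: Instead of appending rules into a dict of groups and then sorting each group separately, B collects the distinct layer keys in first-occurrence order, sorts the whole rule list once by id, and builds each group as a per-layer filter of that sorted list (stable sort makes each filtered group sorted).
import Mathlib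
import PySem

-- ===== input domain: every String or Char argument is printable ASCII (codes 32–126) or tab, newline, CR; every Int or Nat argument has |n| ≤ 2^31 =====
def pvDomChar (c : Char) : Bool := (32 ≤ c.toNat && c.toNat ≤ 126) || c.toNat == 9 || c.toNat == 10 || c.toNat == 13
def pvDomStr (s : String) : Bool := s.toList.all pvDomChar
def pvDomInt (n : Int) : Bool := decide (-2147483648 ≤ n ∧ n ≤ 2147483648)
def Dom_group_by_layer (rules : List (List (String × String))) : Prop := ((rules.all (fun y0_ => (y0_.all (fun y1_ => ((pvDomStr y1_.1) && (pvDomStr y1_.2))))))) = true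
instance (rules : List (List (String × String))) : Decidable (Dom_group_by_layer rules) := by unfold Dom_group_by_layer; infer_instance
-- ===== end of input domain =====

-- B replaces "build groups incrementally in a dict, then sort each group" by "collect the layer
-- keys in first-occurrence order, sort the whole list once by id, then build each group by a
-- per-layer filter of the sorted list" (objective: alternative decomposition; stable sort makes
-- each filtered group come out sorted).

-- ===== PORT A =====
-- rule.get(k, "") on a str->str dict; str(...) is the identity on these string values.
def pvLayerOf (rule : List (String × String)) : String :=
  PySem.Str.lower (PySem.Str.strip (PySem.Dict.getD (PySem.Dict.mk rule) "layer" ""))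

def group_by_layer (rules : List (List (String × String))) : List (String × List (List (String × String))) :=
  let groups : PySem.Dict String (List (List (String × String))) :=
    rules.foldl (fun d rule => d.modify (pvLayerOf rule) [] (fun g => g ++ [rule])) PySem.Dict.empty
  let groups2 :=
    groups.keys.foldl
      (fun d layer =>
        d.insert layer (PySem.List.sorted (d.getD layer [])
          (fun r => PySem.Dict.getD (PySem.Dict.mk r) "id" ""))) groups
  groups2.items

-- ===== PORT B =====
def altNorm (rule : List (String × String)) : String :=
  PySem.Str.lower (PySem.Str.strip (PySem.Dict.getD (PySem.Dict.mk rule) "layer" ""))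

def group_by_layer_alt (rules : List (List (String × String))) : List (String × List (List (String × String))) :=
  let ordered := PySem.List.sorted rules (fun r => PySem.Dict.getD (PySem.Dict.mk r) "id" "")
  let layers := rules.foldl
    (fun acc r => if acc.contains (altNorm r) then acc else acc ++ [altNorm r]) ([] : List String)
  layers.map (fun lay => (lay, ordered.filter (fun r => altNorm r == lay)))

-- ===== PRECONDITION & SPEC =====
def Spec_group_by_layer (rules : List (List (String × String))) (out : List (String × List (List (String × String)))) : Prop := out = group_by_layer_alt rules
instance (rules : List (List (String × String))) (out : List (String × List (List (String × String)))) : Decidable (Spec_group_by_layer rules out) := by unfold Spec_group_by_layer; infer_instance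

-- ===== CLAIM (what is proved, stated in full; the proofs are below) =====
def Claim_equal_group_by_layer : Prop := ∀ (rules : List (List (String × String))), Dom_group_by_layer rules → Spec_group_by_layer rules (group_by_layer rules)

-- ===== LEMMAS AND PROOFS =====
def pvIdOf (rule : List (String × String)) : String :=
  PySem.Dict.getD (PySem.Dict.mk rule) "id" ""

theorem pv_insertBy_cons {α : Type} (key : α → String) (x : α) (l : List α)
    (h : ∀ y ∈ l, key x < key y) :
    PySem.List.insertBy (fun a b => decide (key a < key b)) x l = x :: l := by
  cases l with
  | nil => rfl
  | cons y t =>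
    simp only [PySem.List.insertBy]
    rw [if_pos (by simpa using h y (by simp))]

theorem pv_filter_insertBy {α : Type} (key : α → String) (p : α → Bool) (x : α) (l : List α)
    (hl : l.Pairwise (fun a b => key a ≤ key b)) :
    (PySem.List.insertBy (fun a b => decide (key a < key b)) x l).filter p
      = if p x then PySem.List.insertBy (fun a b => decide (key a < key b)) x (l.filter p)
        else l.filter p := by
  induction l with
  | nil => cases hpx : p x <;> simp [PySem.List.insertBy, List.filter, hpx]
  | cons y t ih =>
    have hpw := (List.pairwise_cons.mp hl)
    simp only [PySem.List.insertBy]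
    by_cases hxy : key x < key y
    · rw [if_pos (by simpa using hxy)]
      cases hpx : p x with
      | true =>
        rw [if_pos rfl]
        have : ∀ z ∈ (y :: t).filter p, key x < key z := by
          intro z hz
          have hz' := List.mem_of_mem_filter hz
          rcases List.mem_cons.mp hz' with rfl | hzt
          · exact hxy
          · exact lt_of_lt_of_le hxy (hpw.1 z hzt)
        rw [pv_insertBy_cons key x _ this]
        simp [List.filter, hpx]
      | false => simp [List.filter, hpx]
    · rw [if_neg (by simpa using hxy)]
      rw [List.filter_cons, List.filter_cons, ih hpw.2]
      cases hpy : p y with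
      | true =>
        simp only [if_true]
        have : PySem.List.insertBy (fun a b => decide (key a < key b)) x (y :: List.filter p t)
            = y :: PySem.List.insertBy (fun a b => decide (key a < key b)) x (List.filter p t) := by
          simp only [PySem.List.insertBy]
          rw [if_neg (by simpa using hxy)]
        rw [this]
        cases hpx : p x <;> simp
      | false =>
        simp only [Bool.false_eq_true, if_false]

theorem pv_sorted_append_singleton {α : Type} (key : α → String) (l : List α) (x : α) :
    PySem.List.sorted (l ++ [x]) key
      = PySem.List.insertBy (fun a b => decide (key a < key b)) x (PySem.List.sorted l key) := by
  rw [PySem.List.sorted_eq_foldl_insertBy, PySem.List.sorted_eq_foldl_insertBy, List.foldl_append]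
  rfl

theorem pv_filter_sorted {α : Type} (key : α → String) (p : α → Bool) (xs : List α) :
    PySem.List.sorted (xs.filter p) key = (PySem.List.sorted xs key).filter p := by
  induction xs using List.reverseRecOn with
  | nil => rfl
  | append_singleton l x ih =>
    rw [List.filter_append, pv_sorted_append_singleton,
      pv_filter_insertBy key p x _ (PySem.List.sorted_pairwise l key)]
    cases hpx : p x with
    | true => simp [List.filter, hpx, pv_sorted_append_singleton, ih]
    | false => simp [List.filter, hpx, ih]

theorem pv_groupfold_getD (rules : List (List (String × String)))
    (d : PySem.Dict String (List (List (String × String)))) (c : String) :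
    (rules.foldl (fun d r => d.modify (pvLayerOf r) [] (fun g => g ++ [r])) d).getD c []
      = d.getD c [] ++ rules.filter (fun r => pvLayerOf r == c) := by
  have h1 : rules.foldl (fun d r => d.modify (pvLayerOf r) [] (fun g => g ++ [r])) d
      = (rules.map (fun r => (pvLayerOf r, r))).foldl
          (fun d p => d.modify p.1 [] (fun g => g ++ [p.2])) d := by
    rw [List.foldl_map]
  rw [h1, PySem.Dict.getD_foldl_modify_append]
  congr 1
  rw [List.filter_map, List.map_map]
  simp [Function.comp_def]

theorem pv_resort_getD (ks : List String) (d : PySem.Dict String (List (List (String × String))))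
    (hnd : ks.Nodup) (c : String) :
    (ks.foldl (fun d l => d.insert l (PySem.List.sorted (d.getD l []) pvIdOf)) d).getD c []
      = if c ∈ ks then PySem.List.sorted (d.getD c []) pvIdOf else d.getD c [] := by
  induction ks generalizing d with
  | nil => simp
  | cons a t ih =>
    obtain ⟨ha, ht⟩ := List.nodup_cons.mp hnd
    simp only [List.foldl_cons]
    rw [ih _ ht, PySem.Dict.getD_insert]
    by_cases hca : c = a
    · subst hca
      rw [if_neg (fun h => ha h), if_pos rfl, if_pos (by simp)]
    · rw [if_neg hca]
      by_cases hct : c ∈ t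
      · rw [if_pos hct, if_pos (by simp [hct])]
      · rw [if_neg hct, if_neg (by simp [hca, hct])]

theorem pv_set_update_noop (s : PySem.Set String) (l : List String) (h : ∀ x ∈ l, x ∈ s) :
    PySem.Set.update s l = s := by
  induction l generalizing s with
  | nil => rfl
  | cons a t ih =>
    have hadd : PySem.Set.add s a = s := by
      simp [PySem.Set.add, PySem.Set.contains, h a (by simp)]
    show PySem.Set.update s (a :: t) = s
    simp only [PySem.Set.update, List.foldl_cons] at *
    rw [hadd]
    exact ih s (fun x hx => h x (by simp [hx]))

-- B's hand-written "append if not already present" fold IS Python's set(…)-in-order builder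
theorem pv_layers_eq_ofList (rules : List (List (String × String))) :
    rules.foldl
      (fun acc r => if acc.contains (altNorm r) then acc else acc ++ [altNorm r]) ([] : List String)
      = PySem.Set.ofList (rules.map pvLayerOf) := by
  rw [PySem.Set.ofList_eq_foldl, List.foldl_map]
  congr 1

theorem pv_main (rules : List (List (String × String))) :
    group_by_layer rules = group_by_layer_alt rules := by
  unfold group_by_layer group_by_layer_alt
  simp only []
  have hid : (fun r => PySem.Dict.getD (PySem.Dict.mk r) "id" "") = pvIdOf := rfl
  rw [hid, pv_layers_eq_ofList]
  set L : List String := rules.map pvLayerOf with hL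
  set g1 : PySem.Dict String (List (List (String × String))) :=
    rules.foldl (fun d rule => d.modify (pvLayerOf rule) [] (fun g => g ++ [rule])) PySem.Dict.empty with hg1
  have hkeys1 : g1.keys = PySem.Set.ofList L := by
    rw [hg1, PySem.Dict.keys_foldl_modify_key]
    simp [PySem.Set.update, PySem.Set.ofList_eq_foldl, hL]
  have hnd1 : g1.keys.Nodup := by
    rw [hkeys1]; exact PySem.Set.nodup_ofList L
  set g2 := g1.keys.foldl (fun d layer => d.insert layer (PySem.List.sorted (d.getD layer []) pvIdOf)) g1 with hg2
  have hkeys2 : g2.keys = g1.keys := by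
    rw [hg2, PySem.Dict.keys_foldl_insert, pv_set_update_noop]
    intro x hx; exact hx
  have hnd2 : g2.keys.Nodup := by rw [hkeys2]; exact hnd1
  have hitems2 : g2.items = g2.keys.map (fun c => (c, g2.getD c [])) :=
    PySem.Dict.items_eq_map_keys g2 hnd2 []
  rw [hitems2, hkeys2, hkeys1]
  apply List.map_congr_left
  intro c hc
  have hA : g2.getD c [] = PySem.List.sorted (rules.filter (fun r => pvLayerOf r == c)) pvIdOf := by
    rw [hg2, pv_resort_getD _ _ hnd1 c, if_pos (by rw [hkeys1]; exact hc), hg1,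
      pv_groupfold_getD]
    simp [PySem.Dict.getD_empty]
  rw [hA, pv_filter_sorted]
  rfl

-- ===== VERDICT (by name: the statement is the Claim_ definition above) =====
theorem group_by_layer_spec : Claim_equal_group_by_layer := by
  intro rules _
  unfold Spec_group_by_layer
  exact pv_main rules
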